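-- pv_equiv track=rewrite | github.com/jeremiah-c-leary/vhdl-style-guide | vsg/tokens.py | parse_natural_number
-- ===== SOURCE A (Python) =====
-- def parse_natural_number(sString):
--     lReturn = []
--     sTemp = ""
--     for sChar in sString:
--         if sChar.lower() == "e":
--             lReturn.append(sTemp)
--             lReturn.append(sChar)
--             sTemp = ""
--         else:
--             sTemp += sChar
--     if len(sTemp) > 0:
--         lReturn.append(sTemp)
--     return lReturn
-- ===== SOURCE B (Python) =====
-- def parse_natural_number(sString):
--     sLower = sString.lower()
--     lReturn = []
--     iStart = 0
--     i = sLower.find('e', iStart)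
--     while i != -1:
--         lReturn.append(sString[iStart:i])
--         lReturn.append(sString[i])
--         iStart = i + 1
--         i = sLower.find('e', iStart)
--     sTail = sString[iStart:]
--     if sTail:
--         lReturn.append(sTail)
--     return lReturn
-- ===== Notes on version B (the rewrite author's own statement) =====
-- stated objective: alternative
-- what changed: A accumulates characters one by one in a buffer inside a single for-loop; B instead lowercases the string once and repeatedly locates the next delimiter letter with str.find, appending slices of the original string between delimiter positions.
import Mathlib
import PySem

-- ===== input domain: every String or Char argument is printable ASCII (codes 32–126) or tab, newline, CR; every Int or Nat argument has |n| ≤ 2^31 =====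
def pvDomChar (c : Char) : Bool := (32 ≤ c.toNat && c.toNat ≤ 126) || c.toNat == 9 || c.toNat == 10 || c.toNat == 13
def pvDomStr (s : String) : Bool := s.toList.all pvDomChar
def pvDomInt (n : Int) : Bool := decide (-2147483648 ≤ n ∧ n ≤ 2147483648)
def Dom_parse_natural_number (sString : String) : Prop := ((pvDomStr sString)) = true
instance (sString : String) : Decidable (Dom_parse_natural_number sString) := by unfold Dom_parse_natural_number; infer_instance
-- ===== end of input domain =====

-- B replaces A's char-by-char accumulator loop with a find/slice scan: repeatedly locate the
-- next delimiter with str.find on the lowercased string and slice segments out directly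
-- (objective: alternative structure, same asymptotic cost).

-- ===== PORT A =====
-- the for-loop of A, state = (lReturn, sTemp)
def pnnLoop : List Char → List (List Char) → List Char → List (List Char) × List Char
  | [], acc, buf => (acc, buf)
  | c :: cs, acc, buf =>
    if PySem.Chars.lower [c] = ['e'] then pnnLoop cs (acc ++ [buf] ++ [[c]]) []
    else pnnLoop cs acc (buf ++ [c])

def pnnAChars (cs : List Char) : List (List Char) :=
  let st := pnnLoop cs [] []
  if 0 < st.2.length then st.1 ++ [st.2] else st.1

def parse_natural_number (sString : String) : List String :=
  (pnnAChars sString.toList).map String.ofList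

-- ===== PORT B =====
-- needed only for termination of the while loop: find from a start past the end is -1
theorem pnn_findFrom_past (low : List Char) (k : Nat) (h : low.length < k) :
    PySem.Chars.findFrom low ['e'] (k : Int) none = -1 := by
  simp [PySem.Chars.findFrom]
  intro h1
  omega

-- the while loop of B: cs is the original chars, low its lowercasing, start the scan index
def pnnAltLoop (cs low : List Char) (start : Nat) (acc : List (List Char)) : List (List Char) :=
  let i := PySem.Chars.findFrom low ['e'] (start : Int) none
  if hi : i = -1 then
    let tail := PySem.List.slice cs (some (start : Int)) none
    if tail = [] then acc else acc ++ [tail]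
  else
    match PySem.List.pyGet? cs i with
    | some c =>
        pnnAltLoop cs low (i.toNat + 1)
          (acc ++ [PySem.List.slice cs (some (start : Int)) (some i)] ++ [[c]])
    | none => acc   -- unreachable: i is a valid index when findFrom ≠ -1
termination_by low.length + 1 - start
decreasing_by
  by_cases hk : start ≤ low.length
  · have hspec := PySem.Chars.findFrom_natCast_spec low ['e'] start hk (by exact hi)
    have h1 : (start : Int) ≤ PySem.Chars.findFrom low ['e'] (start : Int) none := hspec.1
    omega
  · exact absurd (pnn_findFrom_past low start (by omega)) hi

def parse_natural_number_alt (sString : String) : List String :=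
  (pnnAltLoop sString.toList (PySem.Chars.lower sString.toList) 0 []).map String.ofList

-- ===== PRECONDITION & SPEC =====
def Spec_parse_natural_number (sString : String) (out : List String) : Prop := out = parse_natural_number_alt sString
instance (sString : String) (out : List String) : Decidable (Spec_parse_natural_number sString out) := by unfold Spec_parse_natural_number; infer_instance

-- ===== CLAIM (what is proved, stated in full; the proofs are below) =====
def Claim_equal_parse_natural_number : Prop := ∀ (sString : String), Dom_parse_natural_number sString → Spec_parse_natural_number sString (parse_natural_number sString)

-- ===== LEMMAS AND PROOFS =====

theorem pnn_lower_single (c : Char) :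
    PySem.Chars.lower [c] = ['e'] ↔ PySem.Chars.lowerChar c = 'e' := by
  simp [PySem.Chars.lower]

-- accumulator law for A's loop
theorem pnnLoop_acc (cs : List Char) (acc : List (List Char)) (buf : List Char) :
    pnnLoop cs acc buf = (acc ++ (pnnLoop cs [] buf).1, (pnnLoop cs [] buf).2) := by
  induction cs generalizing acc buf with
  | nil => simp [pnnLoop]
  | cons c cs ih =>
    by_cases h : PySem.Chars.lower [c] = ['e']
    · rw [pnnLoop, if_pos h, pnnLoop, if_pos h, ih (acc ++ [buf] ++ [[c]]), ih ([] ++ [buf] ++ [[c]])]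
      simp
    · rw [pnnLoop, if_neg h, pnnLoop, if_neg h]
      exact ih acc (buf ++ [c])

-- an e-free prefix is just appended to the buffer
theorem pnnLoop_efree (pre : List Char) (h : ∀ c ∈ pre, PySem.Chars.lowerChar c ≠ 'e')
    (rest : List Char) (acc : List (List Char)) (buf : List Char) :
    pnnLoop (pre ++ rest) acc buf = pnnLoop rest acc (buf ++ pre) := by
  induction pre generalizing buf with
  | nil => simp
  | cons c pre ih =>
    have hc : ¬ PySem.Chars.lower [c] = ['e'] := by
      rw [pnn_lower_single]; exact h c (by simp)
    rw [List.cons_append, pnnLoop, if_neg hc, ih (fun d hd => h d (by simp [hd]))]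
    simp

theorem pnnA_efree (cs : List Char) (h : ∀ c ∈ cs, PySem.Chars.lowerChar c ≠ 'e') :
    pnnAChars cs = if cs = [] then [] else [cs] := by
  have := pnnLoop_efree cs h [] [] []
  simp only [List.append_nil, List.nil_append] at this
  rw [pnnAChars, this]
  cases cs with
  | nil => simp [pnnLoop]
  | cons c cs => simp [pnnLoop]

theorem pnnA_split (pre : List Char) (e : Char) (rest : List Char)
    (hpre : ∀ c ∈ pre, PySem.Chars.lowerChar c ≠ 'e') (he : PySem.Chars.lowerChar e = 'e') :
    pnnAChars (pre ++ e :: rest) = pre :: [e] :: pnnAChars rest := by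
  have h1 := pnnLoop_efree pre hpre (e :: rest) [] []
  rw [pnnAChars, h1, pnnLoop, if_pos ((pnn_lower_single e).mpr he), pnnLoop_acc]
  simp only [List.nil_append]
  rw [pnnAChars]
  by_cases h : 0 < (pnnLoop rest [] []).2.length <;> simp [h]

-- singleton infix is membership
theorem pnn_singleton_infix {c : Char} {l : List Char} : [c] <:+: l ↔ c ∈ l := by
  constructor
  · intro h; exact h.sublist.subset (by simp)
  · intro h
    obtain ⟨s, t, rfl⟩ := List.append_of_mem h
    exact ⟨s, t, by simp⟩

theorem pnn_singleton_prefix {c : Char} {l : List Char} : [c] <+: l ↔ l.head? = some c := by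
  cases l with
  | nil => simp
  | cons a t => simp [List.cons_prefix_cons, eq_comm]

-- find on the lowered suffix: -1 means the suffix is e-free
theorem pnn_find_neg (t : List Char) (h : PySem.Chars.find (PySem.Chars.lower t) ['e'] = -1) :
    ∀ c ∈ t, PySem.Chars.lowerChar c ≠ 'e' := by
  intro c hc hce
  exact (PySem.Chars.find_eq_neg_one_iff _ _).mp h
    (pnn_singleton_infix.mpr (by
      have hmap : PySem.Chars.lower t = t.map PySem.Chars.lowerChar := rfl
      rw [hmap]; exact hce ▸ List.mem_map_of_mem hc))

-- find on the lowered suffix: k = find ≥ 0 points at the first e-like char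
theorem pnn_find_pos (t : List Char) (h0 : 0 ≤ PySem.Chars.find (PySem.Chars.lower t) ['e']) :
    ∃ (k : Nat) (hkl : k < t.length), (PySem.Chars.find (PySem.Chars.lower t) ['e'] = (k : Int)) ∧
      PySem.Chars.lowerChar (t[k]'hkl) = 'e' ∧
      (∀ c ∈ t.take k, PySem.Chars.lowerChar c ≠ 'e') := by
  obtain ⟨hpref, hmin⟩ := PySem.Chars.find_spec (sub := ['e']) (s := PySem.Chars.lower t) h0
  have hmap : PySem.Chars.lower t = t.map PySem.Chars.lowerChar := rfl
  set k := (PySem.Chars.find (PySem.Chars.lower t) ['e']).toNat with hk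
  have h1 : ((PySem.Chars.lower t).drop k).head? = some 'e' := pnn_singleton_prefix.mp hpref
  have hklen : k < t.length := by
    by_contra hge
    rw [List.drop_eq_nil_of_le (by rw [hmap, List.length_map]; omega)] at h1
    simp at h1
  refine ⟨k, hklen, (Int.toNat_of_nonneg h0).symm, ?_, ?_⟩
  · rw [List.head?_drop, hmap] at h1
    simp only [List.getElem?_map] at h1
    rw [List.getElem?_eq_getElem hklen] at h1
    simpa using h1
  · intro c hc hce
    rw [List.mem_take_iff_getElem] at hc
    obtain ⟨j, hj, rfl⟩ := hc
    apply hmin j (by omega)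
    rw [pnn_singleton_prefix, List.head?_drop, hmap]
    simp only [List.getElem?_map]
    rw [List.getElem?_eq_getElem (by omega)]
    simpa using hce

-- the loop invariant: from scan position `start`, B's loop appends exactly what A produces
-- on the remaining suffix
theorem pnn_inv (n : Nat) : ∀ (cs : List Char) (start : Nat) (acc : List (List Char)),
    start ≤ cs.length → cs.length - start ≤ n →
    pnnAltLoop cs (PySem.Chars.lower cs) start acc = acc ++ pnnAChars (cs.drop start) := by
  induction n with
  | zero =>
    intro cs start acc hle hn
    have hstart : start = cs.length := by omega
    have hdrop : cs.drop start = [] := List.drop_eq_nil_of_le (by omega)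
    have hlen : (PySem.Chars.lower cs).length = cs.length := by
      have hmap : PySem.Chars.lower cs = cs.map PySem.Chars.lowerChar := rfl
      rw [hmap, List.length_map]
    have hfind : PySem.Chars.findFrom (PySem.Chars.lower cs) ['e'] (start : Int) none = -1 := by
      rw [PySem.Chars.findFrom_natCast _ _ _ (by omega)]
      have : (PySem.Chars.lower cs).drop start = [] := List.drop_eq_nil_of_le (by omega)
      rw [this]
      simp [PySem.Chars.find_eq_neg_one_iff, List.infix_iff_prefix_suffix]
    rw [pnnAltLoop, dif_pos hfind]
    have hsl : PySem.List.slice cs (some (start : Int)) none = [] := by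
      rw [PySem.List.slice_from cs (by omega : (0:Int) ≤ (start : Int))]
      simpa using hdrop
    simp only [hsl]
    rw [hdrop, pnnAChars]
    simp [pnnLoop]
  | succ n ih =>
    intro cs start acc hle hn
    have hmap : PySem.Chars.lower cs = cs.map PySem.Chars.lowerChar := rfl
    have hlen : (PySem.Chars.lower cs).length = cs.length := by rw [hmap, List.length_map]
    have hdropmap : (PySem.Chars.lower cs).drop start = PySem.Chars.lower (cs.drop start) := by
      rw [hmap]
      exact (List.map_drop ..).symm
    set t := cs.drop start with ht
    rw [pnnAltLoop, PySem.Chars.findFrom_natCast _ _ _ (by omega), hdropmap]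
    by_cases hf : PySem.Chars.find (PySem.Chars.lower t) ['e'] = -1
    · -- no further delimiter: emit the tail if nonempty
      rw [if_pos hf, dif_pos rfl]
      have hsl : PySem.List.slice cs (some (start : Int)) none = t := by
        rw [PySem.List.slice_from cs (by omega : (0:Int) ≤ (start : Int))]
        simp [ht]
      rw [hsl, pnnA_efree t (pnn_find_neg t hf)]
      by_cases hnil : t = [] <;> simp [hnil]
    · -- delimiter at suffix offset k, absolute index start + k
      have h0 : (0:Int) ≤ PySem.Chars.find (PySem.Chars.lower t) ['e'] := by
        rcases (PySem.Chars.neg_one_le_find (PySem.Chars.lower t) ['e']).lt_or_eq with h' | h'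
        · omega
        · exact absurd h'.symm hf
      obtain ⟨k, hklen, hkeq, hke, hpre⟩ := pnn_find_pos t h0
      rw [if_neg hf, hkeq]
      have hne : ¬ ((start : Int) + (k : Int) = -1) := by omega
      rw [dif_neg hne]
      have hidx : start + k < cs.length := by
        have : t.length = cs.length - start := by rw [ht, List.length_drop]
        omega
      have htk : t[k]'hklen = cs[start + k]'hidx := by
        simp [ht, List.getElem_drop]
      have hget : PySem.List.pyGet? cs ((start : Int) + (k : Int)) = some (t[k]'hklen) := by
        rw [show (start : Int) + (k : Int) = ((start + k : Nat) : Int) by push_cast; ring,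
          PySem.List.pyGet?_natCast, List.getElem?_eq_getElem hidx, htk]
      rw [hget]
      have hslice : PySem.List.slice cs (some (start : Int)) (some ((start : Int) + (k : Int))) = t.take k := by
        rw [PySem.List.slice_toNat cs (by omega) (by omega)]
        have e1 : ((start : Int) + (k : Int)).toNat - ((start : Int)).toNat = k := by omega
        have e2 : ((start : Int)).toNat = start := by omega
        rw [e1, e2, ht]
      rw [hslice]
      have hrec := ih cs (((start : Int) + (k : Int)).toNat + 1)
        (acc ++ [t.take k] ++ [[t[k]'hklen]])
        (by omega)
        (by omega)
      show pnnAltLoop cs (PySem.Chars.lower cs) (((start : Int) + (k : Int)).toNat + 1)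
        (acc ++ [t.take k] ++ [[t[k]'hklen]]) = acc ++ pnnAChars t
      rw [hrec]
      have hdrop2 : cs.drop (((start : Int) + (k : Int)).toNat + 1) = t.drop (k + 1) := by
        rw [ht, List.drop_drop]
        congr 1
      rw [hdrop2]
      have hdecomp : t = t.take k ++ (t[k]'hklen) :: t.drop (k + 1) := by
        conv_lhs => rw [← List.take_append_drop k t]
        rw [List.drop_eq_getElem_cons hklen]
      conv_rhs => rw [hdecomp]
      rw [pnnA_split _ _ _ hpre hke]
      simp

-- ===== VERDICT (by name: the statement is the Claim_ definition above) =====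
theorem parse_natural_number_spec : Claim_equal_parse_natural_number := by
  intro s _
  unfold Spec_parse_natural_number parse_natural_number parse_natural_number_alt
  rw [pnn_inv s.toList.length s.toList 0 [] (by omega) (by omega)]
  simp
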